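-- pv_equiv track=rewrite | github.com/felixfritzen/dl-adv-group11 | src/utils.py | key2key
-- ===== SOURCE A (Python) =====
-- def key2key(dict1, dict2):
--     """If targets are the same, maps key to key"""
--     feature_to_key_dict2 = {}
--     for key, value in dict2.items():
--         feature_to_key_dict2[tuple(value)] = key
--     mapping = {}
--     for key1, value1 in dict1.items():
--         feature_tuple = tuple(value1)
--         if feature_tuple in feature_to_key_dict2:
--             mapping[key1] = feature_to_key_dict2[feature_tuple]
--     mapping = {str(key): int(value) for key, value in mapping.items()}
--     return mapping
-- ===== SOURCE B (Python) =====
-- def key2key(dict1, dict2):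
--     """If targets are the same, maps key to key"""
--     result = {}
--     for key1, value1 in dict1.items():
--         key2 = next((k for k, v in dict2.items() if v == value1), None)
--         if key2 is not None:
--             result[str(key1)] = int(key2)
--     return result
-- ===== Notes on version B (the rewrite author's own statement) =====
-- stated objective: simpler
-- what changed: Drops the reverse-index dict and the final rebuilding comprehension: a direct first-match scan of dict2 per dict1 key; Pre_ excludes inputs where a value list queried by dict1 is shared by two different dict2 keys, where A's reverse-index overwrite makes the last matching key win while a direct scan naturally takes the first - a tie neither behaviour specifies.
-- outside the precondition, e.g. on key2key({'a': [1]}, {1: [1], 2: [1]}): A returns {'a': 2}, B returns {'a': 1}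
import Mathlib
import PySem

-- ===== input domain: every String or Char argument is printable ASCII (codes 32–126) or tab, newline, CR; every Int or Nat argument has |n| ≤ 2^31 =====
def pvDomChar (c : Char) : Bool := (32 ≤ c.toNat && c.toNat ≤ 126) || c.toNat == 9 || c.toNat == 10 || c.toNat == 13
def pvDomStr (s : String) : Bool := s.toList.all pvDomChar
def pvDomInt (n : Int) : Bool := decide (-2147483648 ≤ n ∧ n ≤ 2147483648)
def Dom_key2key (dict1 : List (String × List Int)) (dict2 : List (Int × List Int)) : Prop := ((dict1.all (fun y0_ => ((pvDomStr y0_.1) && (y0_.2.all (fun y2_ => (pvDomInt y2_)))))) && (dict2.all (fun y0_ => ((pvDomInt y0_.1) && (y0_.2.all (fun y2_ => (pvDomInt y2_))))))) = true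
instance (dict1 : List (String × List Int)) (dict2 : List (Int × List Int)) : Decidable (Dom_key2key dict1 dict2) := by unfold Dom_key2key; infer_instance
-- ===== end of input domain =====

-- B drops A's reverse-index dict and final rebuilding comprehension: a direct first-match
-- scan of dict2 per dict1 key (objective: simpler); Pre_ excludes dict2 with duplicate
-- value lists, where A's last-wins overwrite and B's first match are both defensible.


-- ===== PORT A =====
-- The dict parameters arrive as association lists; PySem.Dict.ofList reproduces Python's
-- dict construction (duplicate keys: last value wins, first position kept), so .items of it
-- is exactly what dict.items() yields.  str(key)/int(value) are identities on String/Int.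
def key2key (dict1 : List (String × List Int)) (dict2 : List (Int × List Int)) : List (String × Int) :=
  -- feature_to_key_dict2 = {}; for key, value in dict2.items(): feature_to_key_dict2[tuple(value)] = key
  let featureToKey : PySem.Dict (List Int) Int :=
    (PySem.Dict.ofList dict2).items.foldl (fun d p => d.insert p.2 p.1) PySem.Dict.empty
  -- mapping = {}; for key1, value1 in dict1.items(): if tuple(value1) in feature_to_key_dict2: mapping[key1] = feature_to_key_dict2[tuple(value1)]
  let mapping : PySem.Dict String Int :=
    (PySem.Dict.ofList dict1).items.foldl
      (fun m p => if featureToKey.contains p.2 then m.insert p.1 (featureToKey.getD p.2 0) else m)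
      PySem.Dict.empty
  -- mapping = {str(key): int(value) for key, value in mapping.items()}
  (mapping.items.foldl (fun m (p : String × Int) => m.insert p.1 p.2) PySem.Dict.empty).items

-- ===== PORT B =====
-- result = {}; for key1, value1 in dict1.items():
--   key2 = next((k for k, v in dict2.items() if v == value1), None)   -- first match = List.find?
--   if key2 is not None: result[str(key1)] = int(key2)
def key2key_alt (dict1 : List (String × List Int)) (dict2 : List (Int × List Int)) : List (String × Int) :=
  let items2 := (PySem.Dict.ofList dict2).items
  ((PySem.Dict.ofList dict1).items.foldl
    (fun (m : PySem.Dict String Int) p =>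
      match (items2.find? (fun q => q.2 == p.2)).map (·.1) with
      | some k2 => m.insert p.1 k2
      | none => m)
    PySem.Dict.empty).items

-- ===== PRECONDITION & SPEC =====
-- Pre_ excludes inputs where some value list queried by dict1 is shared by two different
-- dict2 keys: there the matching key is a tie that no specification fixes (A's reverse
-- index keeps the last such key, B's direct scan the first), so neither value is the one to claim.
def Pre_key2key (dict1 : List (String × List Int)) (dict2 : List (Int × List Int)) : Prop :=
  ∀ p ∈ dict1, ((PySem.Dict.ofList dict2).values).count p.2 ≤ 1
instance (dict1 : List (String × List Int)) (dict2 : List (Int × List Int)) : Decidable (Pre_key2key dict1 dict2) := by unfold Pre_key2key; infer_instance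

def pvWitness_key2key : (List (String × List Int)) × (List (Int × List Int)) :=
  ([("a", [1]), ("b", [2, 3])], [(1, [1]), (2, [2, 3]), (3, [4])])

def Spec_key2key (dict1 : List (String × List Int)) (dict2 : List (Int × List Int)) (out : List (String × Int)) : Prop := out = key2key_alt dict1 dict2
instance (dict1 : List (String × List Int)) (dict2 : List (Int × List Int)) (out : List (String × Int)) : Decidable (Spec_key2key dict1 dict2 out) := by unfold Spec_key2key; infer_instance

-- ===== CLAIM (what is proved, stated in full; the proofs are below) =====
def Claim_equal_key2key : Prop := ∀ (dict1 : List (String × List Int)) (dict2 : List (Int × List Int)), Dom_key2key dict1 dict2 → Pre_key2key dict1 dict2 → Spec_key2key dict1 dict2 (key2key dict1 dict2)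

-- ===== LEMMAS AND PROOFS =====

-- A's reverse-index lookup is the last matching key of the scanned list.
theorem lookup_eq_last_match (l : List (Int × List Int)) (d : PySem.Dict (List Int) Int)
    (key : List Int) :
    (l.foldl (fun d p => d.insert p.2 p.1) d).get? key
      = l.foldl (fun best q => if q.2 == key then some q.1 else best) (d.get? key) := by
  induction l generalizing d with
  | nil => rfl
  | cons p t ih =>
      simp only [List.foldl_cons, ih]
      congr 1
      rw [PySem.Dict.get?_insert]
      by_cases h : p.2 = key
      · subst h; simp
      · rw [if_neg (fun hh => h hh.symm)]
        simp [h]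

-- A last-match scan with no matching element keeps its accumulator.
theorem lastmatch_of_no_match (l : List (Int × List Int)) (v : List Int) (init : Option Int)
    (h : ∀ q ∈ l, (q.2 == v) = false) :
    l.foldl (fun best q => if q.2 == v then some q.1 else best) init = init := by
  induction l generalizing init with
  | nil => rfl
  | cons p t ih =>
      have hp := h p List.mem_cons_self
      simp only [List.foldl_cons, hp, Bool.false_eq_true, if_false]
      exact ih init (fun q hq => h q (List.mem_cons_of_mem _ hq))

-- Every pair of the built dict comes from the input association list.
theorem update_items_subset {κ ν : Type} [BEq κ] [LawfulBEq κ] (l : List (κ × ν)) :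
    ∀ (d : PySem.Dict κ ν) (p : κ × ν), p ∈ (d.update l).items → p ∈ d.items ∨ p ∈ l := by
  induction l with
  | nil => intro d p hd; exact Or.inl hd
  | cons q t ih =>
      intro d p hd
      rcases ih (d.insert q.1 q.2) p hd with hmem | hmem
      · rcases (PySem.Dict.mem_items_insert _ _ _ _).1 hmem with he | ⟨hin, _⟩
        · exact Or.inr (by simp [he])
        · exact Or.inl hin
      · exact Or.inr (List.mem_cons_of_mem _ hmem)

theorem mem_items_ofList {κ ν : Type} [BEq κ] [LawfulBEq κ] (l : List (κ × ν)) (p : κ × ν)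
    (hp : p ∈ (PySem.Dict.ofList l).items) : p ∈ l := by
  rcases update_items_subset l PySem.Dict.empty p hp with hmem | hmem
  · rw [show (PySem.Dict.empty : PySem.Dict κ ν).items = [] from rfl] at hmem
    cases hmem
  · exact hmem

-- If the queried value occurs at most once, the last matching key is the first one.
theorem lastmatch_eq_find (l : List (Int × List Int)) (v : List Int)
    (h : (l.map (·.2)).count v ≤ 1) :
    l.foldl (fun best q => if q.2 == v then some q.1 else best) none
      = (l.find? (fun q => q.2 == v)).map (·.1) := by
  induction l with
  | nil => rfl
  | cons p t ih =>
      cases hb : (p.2 == v) with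
      | true =>
          have hp : p.2 = v := by simpa using hb
          have hcnt0 : (t.map (·.2)).count v = 0 := by
            have := h
            rw [List.map_cons, List.count_cons, if_pos (by simp [hp])] at this
            omega
          have hrest : ∀ q ∈ t, (q.2 == v) = false := by
            intro q hq
            have := List.count_eq_zero.1 hcnt0
            have : q.2 ≠ v := fun he => this (he ▸ List.mem_map_of_mem hq)
            simp [this]
          rw [List.foldl_cons, if_pos hb, lastmatch_of_no_match t v _ hrest]
          simp [hb]
      | false =>
          rw [List.foldl_cons, if_neg (by simp [hb]), List.find?_cons_of_neg (by simp [hb])]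
          refine ih ?_
          have := h
          rw [List.map_cons, List.count_cons] at this
          omega

-- A conditional-insert loop over fresh, pairwise-distinct keys appends its hits.
theorem items_foldl_insert_opt (f : List Int → Option Int) (l : List (String × List Int))
    (m : PySem.Dict String Int) (hm : m.keys.Nodup)
    (hfresh : ∀ p ∈ l, m.contains p.1 = false) (hnd : (l.map (·.1)).Nodup) :
    (l.foldl (fun m p => match f p.2 with | some k => m.insert p.1 k | none => m) m).items
      = m.items ++ l.flatMap (fun p => match f p.2 with | some k => [(p.1, k)] | none => []) := by
  induction l generalizing m with
  | nil => simp
  | cons p t ih =>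
      simp only [List.foldl_cons, List.flatMap_cons]
      simp only [List.map_cons, List.nodup_cons] at hnd
      cases hf : f p.2 with
      | none =>
          rw [ih m hm (fun q hq => hfresh q (List.mem_cons_of_mem _ hq)) hnd.2]
          simp
      | some k =>
          have hpc : m.contains p.1 = false := hfresh p (List.mem_cons_self)
          have hkeys : (m.insert p.1 k).keys = m.keys ++ [p.1] :=
            PySem.Dict.keys_insert_of_not_contains _ _ hpc
          have hnodup' : (m.insert p.1 k).keys.Nodup := by
            rw [hkeys]
            refine List.Nodup.append hm (List.nodup_singleton _) ?_
            intro a ha hb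
            rw [List.mem_singleton] at hb
            subst hb
            rw [← PySem.Dict.contains_iff_mem_keys] at ha
            simp [hpc] at ha
          have hfresh' : ∀ q ∈ t, (m.insert p.1 k).contains q.1 = false := by
            intro q hq
            rw [← Bool.not_eq_true, PySem.Dict.contains_iff_mem_keys, hkeys]
            simp only [List.mem_append, List.mem_singleton]
            rintro (hmem | hmem)
            · have := hfresh q (List.mem_cons_of_mem _ hq)
              rw [← Bool.not_eq_true, PySem.Dict.contains_iff_mem_keys] at this
              exact this hmem
            · exact hnd.1 (hmem ▸ List.mem_map_of_mem hq)
          rw [ih (m.insert p.1 k) hnodup' hfresh' hnd.2,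
              PySem.Dict.items_insert_of_not_contains _ _ hpc]
          simp

-- The fst-projection of the flatMap result is a sublist of the scanned keys.
theorem flatMap_opt_fst_sublist (f : List Int → Option Int) (l : List (String × List Int)) :
    ((l.flatMap (fun p => match f p.2 with | some k => [(p.1, k)] | none => [])).map (·.1)).Sublist
      (l.map (·.1)) := by
  induction l with
  | nil => simp
  | cons p t ih =>
      simp only [List.flatMap_cons, List.map_append, List.map_cons]
      cases hf : f p.2 with
      | none => simpa using List.Sublist.cons p.1 ih
      | some k => simpa using List.Sublist.cons₂ p.1 ih

-- Rebuilding a dict from items with pairwise-distinct keys returns the same items.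
theorem items_rebuild (l : List (String × Int)) (hnd : (l.map (·.1)).Nodup) :
    (l.foldl (fun m (p : String × Int) => m.insert p.1 p.2) PySem.Dict.empty).items = l := by
  have h := PySem.Dict.items_foldl_insert_fresh (l := l) (k := (·.1)) (v := (·.2))
      (d := PySem.Dict.empty) (by intro a _; exact PySem.Dict.contains_empty _) hnd
  simpa using h

-- ===== VERDICT (by name: the statement is the Claim_ definition above) =====
theorem key2key_spec : Claim_equal_key2key := by
  intro dict1 dict2 _ hpre
  unfold Spec_key2key key2key key2key_alt
  dsimp only
  set items2 := (PySem.Dict.ofList dict2).items with hitems2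
  set items1 := (PySem.Dict.ofList dict1).items with hitems1
  set ftk : PySem.Dict (List Int) Int :=
    items2.foldl (fun d p => d.insert p.2 p.1) PySem.Dict.empty with hftk
  have hscan : ∀ v : List Int, (items2.map (·.2)).count v ≤ 1 →
      ftk.get? v = (items2.find? (fun q => q.2 == v)).map (·.1) := by
    intro v hv
    rw [hftk, lookup_eq_last_match, PySem.Dict.get?_empty, lastmatch_eq_find _ _ hv]
  have hnd1 : (items1.map (·.1)).Nodup := PySem.Dict.nodup_keys_ofList dict1
  -- rewrite A's inner loop body into the option-match form
  have hstep : (fun (m : PySem.Dict String Int) (p : String × List Int) =>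
        if ftk.contains p.2 then m.insert p.1 (ftk.getD p.2 0) else m)
      = (fun m p => match ftk.get? p.2 with | some k => m.insert p.1 k | none => m) := by
    funext m p
    rcases hg : ftk.get? p.2 with _ | k
    · have : ftk.contains p.2 = false := by
        rw [PySem.Dict.contains_eq_isSome_get?, hg]; rfl
      simp [this]
    · have hc : ftk.contains p.2 = true := by
        rw [PySem.Dict.contains_eq_isSome_get?, hg]; rfl
      have hd : ftk.getD p.2 0 = k := by
        rw [PySem.Dict.getD_eq_get?_getD, hg]; rfl
      simp [hc, hd]
  rw [hstep]
  rw [items_foldl_insert_opt (fun v => ftk.get? v) items1 PySem.Dict.empty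
        (by rw [PySem.Dict.keys_empty]; exact List.nodup_nil)
        (fun p _ => PySem.Dict.contains_empty _) hnd1]
  rw [show (PySem.Dict.empty : PySem.Dict String Int).items = [] from rfl, List.nil_append]
  rw [items_rebuild _ ((flatMap_opt_fst_sublist _ _).nodup hnd1)]
  -- B's fold appends its hits too, with the first-match function
  rw [items_foldl_insert_opt (fun v => (items2.find? (fun q => q.2 == v)).map (·.1)) items1
        PySem.Dict.empty
        (by rw [PySem.Dict.keys_empty]; exact List.nodup_nil)
        (fun p _ => PySem.Dict.contains_empty _) hnd1]
  rw [show (PySem.Dict.empty : PySem.Dict String Int).items = [] from rfl, List.nil_append]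
  refine List.flatMap_congr (fun p hp => ?_)
  have hcnt : (items2.map (·.2)).count p.2 ≤ 1 := by
    have hmem : p ∈ dict1 := mem_items_ofList dict1 p (hitems1 ▸ hp)
    have := hpre p hmem
    simpa [PySem.Dict.values, hitems2] using this
  rw [hscan p.2 hcnt]
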